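-- pv_equiv track=rewrite | github.com/stayhungry134/data_structure | LeetCode/1_简单题/1869_哪种连续子字符串更长.py | checkZeroOnes
-- ===== SOURCE A (Python) =====
-- def checkZeroOnes(s: str) -> bool:
--     n = len(s)
--     len_0 = 1 if s[0] == '0' else 0
--     len_1 = 1 if s[0] == '1' else 0
--     tem_cnt = 0
--     pre_c = ''
--     for c in s:
--         if c == pre_c:
--             tem_cnt += 1
--         else:
--             if pre_c == '1':
--                 len_1 = max(len_1, tem_cnt)
--             else:
--                 len_0 = max(len_0, tem_cnt)
--             tem_cnt = 1
--         pre_c = c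
--     if pre_c == '1':
--         len_1 = max(tem_cnt, len_1)
--     else:
--         len_0 = max(tem_cnt, len_0)
--     return len_1 > len_0
-- ===== SOURCE B (Python) =====
-- def checkZeroOnes(s: str) -> bool:
--     # group the string into maximal runs, then aggregate with max()
--     runs = []
--     i, n = 0, len(s)
--     while i < n:
--         j = i
--         while j < n and s[j] == s[i]:
--             j += 1
--         runs.append((s[i], j - i))
--         i = j
--     len_1 = max((l for c, l in runs if c == '1'), default=0)
--     len_0 = max((l for c, l in runs if c != '1'), default=0)
--     return len_1 > len_0
-- ===== Notes on version B (the rewrite author's own statement) =====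
-- stated objective: idiomatic
-- what changed: B first groups the string into maximal runs (char, length) and then takes the maxima of the 1-run lengths and the non-1-run lengths with max(..., default=0), replacing A's single pass with running maxima, a temporary counter and a previous-character sentinel.
-- crash fix: On the empty string A raises IndexError (it evaluates s[0]); B naturally returns False there. — e.g. on checkZeroOnes(""): A raises IndexError, B returns false
import Mathlib
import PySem

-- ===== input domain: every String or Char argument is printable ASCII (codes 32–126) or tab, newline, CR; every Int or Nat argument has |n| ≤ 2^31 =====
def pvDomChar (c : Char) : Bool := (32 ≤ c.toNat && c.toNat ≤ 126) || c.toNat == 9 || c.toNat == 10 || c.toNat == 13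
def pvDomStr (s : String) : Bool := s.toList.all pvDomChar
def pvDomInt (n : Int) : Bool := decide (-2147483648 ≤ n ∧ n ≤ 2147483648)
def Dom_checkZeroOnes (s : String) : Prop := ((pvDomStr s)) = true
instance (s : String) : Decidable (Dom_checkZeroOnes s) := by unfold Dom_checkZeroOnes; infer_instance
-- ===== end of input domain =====

-- B groups the string into maximal runs and takes maxima over the grouped run lengths,
-- replacing A's running-max/temp-counter/previous-char single pass (objective: idiomatic).

-- ===== PORT A =====
-- one loop step of A: state (len_0, len_1, tem_cnt, pre_c); Python's pre_c = '' is `none`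
def pvStepA (st : Int × Int × Int × Option Char) (c : Char) : Int × Int × Int × Option Char :=
  match st with
  | (l0, l1, tem, pre) =>
    if some c = pre then (l0, l1, tem + 1, some c)
    else if pre = some '1' then (l0, max l1 tem, 1, some c)
    else (max l0 tem, l1, 1, some c)

def checkZeroOnes (s : String) : Bool :=
  let cs := s.toList
  match cs.head? with   -- s[0]: IndexError on "" (excluded by Pre_), else the first char
  | none => false
  | some c0 =>
    let len0 : Int := if c0 = '0' then 1 else 0
    let len1 : Int := if c0 = '1' then 1 else 0
    match cs.foldl pvStepA (len0, len1, 0, none) with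
    | (l0, l1, tem, pre) =>
      if pre = some '1' then decide (l0 < max tem l1) else decide (max tem l0 < l1)

-- ===== PORT B =====
-- the grouping pass of Source B: maximal runs of equal chars as (char, length)
def pvRuns : List Char → List (Char × Int)
  | [] => []
  | c :: rest =>
      (c, 1 + ((rest.takeWhile (· == c)).length : Int)) :: pvRuns (rest.dropWhile (· == c))
termination_by l => l.length
decreasing_by
  have := List.length_dropWhile_le (· == c) rest
  simp; omega

def checkZeroOnes_alt (s : String) : Bool :=
  let runs := pvRuns s.toList
  let len1 : Int := (PySem.List.max? (runs.filterMap (fun p => if p.1 = '1' then some p.2 else none)) (fun x => x)).getD 0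
  let len0 : Int := (PySem.List.max? (runs.filterMap (fun p => if p.1 ≠ '1' then some p.2 else none)) (fun x => x)).getD 0
  decide (len0 < len1)

-- ===== PRECONDITION & SPEC =====
-- A evaluates s[0] and raises IndexError on the empty string; Pre_ excludes exactly that input.
def Pre_checkZeroOnes (s : String) : Prop := s ≠ ""
instance (s : String) : Decidable (Pre_checkZeroOnes s) := by unfold Pre_checkZeroOnes; infer_instance
def pvWitness_checkZeroOnes : String := "110"

-- On the empty string A raises IndexError (it evaluates s[0]); B naturally returns False there.
def Raises_checkZeroOnes (s : String) : Prop := s = ""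
instance (s : String) : Decidable (Raises_checkZeroOnes s) := by unfold Raises_checkZeroOnes; infer_instance
def pvRaiseWitness_checkZeroOnes : String := ""
def pvRaiseWitnessOut_checkZeroOnes : Bool := false

def Spec_checkZeroOnes (s : String) (out : Bool) : Prop := out = checkZeroOnes_alt s
instance (s : String) (out : Bool) : Decidable (Spec_checkZeroOnes s out) := by unfold Spec_checkZeroOnes; infer_instance

-- ===== CLAIM (what is proved, stated in full; the proofs are below) =====
def Claim_equal_checkZeroOnes : Prop := ∀ (s : String), Dom_checkZeroOnes s → Pre_checkZeroOnes s → Spec_checkZeroOnes s (checkZeroOnes s)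
def Claim_raises_checkZeroOnes : Prop := (∀ (s : String), Dom_checkZeroOnes s → Raises_checkZeroOnes s → ¬ Pre_checkZeroOnes s) ∧ (Dom_checkZeroOnes (pvRaiseWitness_checkZeroOnes) ∧ Raises_checkZeroOnes (pvRaiseWitness_checkZeroOnes) ∧ checkZeroOnes_alt (pvRaiseWitness_checkZeroOnes) = pvRaiseWitnessOut_checkZeroOnes)

-- ===== LEMMAS AND PROOFS =====

-- the closing step of A applied to a state, yielding the pair (len_0, len_1)
def pvClose (st : Int × Int × Int × Option Char) : Int × Int :=
  match st with
  | (l0, l1, tem, pre) => if pre = some '1' then (l0, max tem l1) else (max tem l0, l1)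

theorem pvClose_def (l0 l1 tem : Int) (pre : Option Char) :
    pvClose (l0, l1, tem, pre) = if pre = some '1' then (l0, max tem l1) else (max tem l0, l1) := rfl

theorem pvStepA_def (l0 l1 tem : Int) (pre : Option Char) (c : Char) :
    pvStepA (l0, l1, tem, pre) c =
      if some c = pre then (l0, l1, tem + 1, some c)
      else if pre = some '1' then (l0, max l1 tem, 1, some c)
      else (max l0 tem, l1, 1, some c) := rfl

-- grouped run-length maxima of B, in foldl-max normal form
def pvM1 (cs : List Char) : Int :=
  ((pvRuns cs).filterMap (fun p => if p.1 = '1' then some p.2 else none)).foldl max 0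
def pvM0 (cs : List Char) : Int :=
  ((pvRuns cs).filterMap (fun p => if p.1 ≠ '1' then some p.2 else none)).foldl max 0

theorem foldl_max_pull (l : List Int) (a b : Int) :
    l.foldl max (max a b) = max a (l.foldl max b) := by
  induction l generalizing b with
  | nil => simp
  | cons x t ih =>
      simp only [List.foldl_cons]
      rw [max_assoc, ih]

theorem foldl_max_cons (x : Int) (l : List Int) :
    (x :: l).foldl max 0 = max x (l.foldl max 0) := by
  simp only [List.foldl_cons]
  rw [max_comm (0 : Int) x, foldl_max_pull]

theorem foldl_max_nonneg (l : List Int) : 0 ≤ l.foldl max 0 :=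
  (PySem.List.le_foldl_max l 0).1

theorem maxD_eq_foldl (l : List Int) (h : ∀ x ∈ l, 0 ≤ x) :
    (PySem.List.max? l (fun x => x)).getD 0 = l.foldl max 0 := by
  cases l with
  | nil => simp [PySem.List.max?]
  | cons x t =>
      rw [PySem.List.max?_id_cons, foldl_max_cons]
      have hx : 0 ≤ x := h x (by simp)
      have h2 := (PySem.List.le_foldl_max t x).1
      have h3 : t.foldl max x = max x (t.foldl max 0) := by
        rw [← foldl_max_pull, max_comm x 0, foldl_max_pull]
        omega
      simp [h3]

theorem pvRuns_len_pos : ∀ (cs : List Char), ∀ p ∈ pvRuns cs, 1 ≤ p.2 := by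
  intro cs
  induction cs using pvRuns.induct with
  | case1 => simp [pvRuns]
  | case2 c rest ih =>
      intro p hp
      rw [pvRuns] at hp
      rcases List.mem_cons.mp hp with hp | hp
      · subst hp; simp
      · exact ih p hp

theorem dropWhile_head_not (p : Char → Bool) : ∀ (l : List Char) (x : Char),
    (l.dropWhile p).head? = some x → p x = false := by
  intro l
  induction l with
  | nil => intro x h; simp [List.dropWhile] at h
  | cons y t ih =>
      intro x h
      by_cases hy : p y = true
      · rw [List.dropWhile_cons_of_pos hy] at h; exact ih x h
      · rw [List.dropWhile_cons_of_neg hy] at h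
        simp at h
        subst h
        simpa using hy

-- folding A's step over a run of equal characters just bumps tem_cnt
theorem foldl_run (c : Char) : ∀ (run : List Char), (∀ x ∈ run, x = c) →
    ∀ (l0 l1 t : Int), run.foldl pvStepA (l0, l1, t, some c) =
      (l0, l1, t + (run.length : Int), some c) := by
  intro run
  induction run with
  | nil => intro _ l0 l1 t; simp
  | cons x r ih =>
      intro h l0 l1 t
      have hx : x = c := h x (by simp)
      simp only [List.foldl_cons, pvStepA, hx, if_pos]
      rw [ih (fun y hy => h y (List.mem_cons_of_mem _ hy)) l0 l1 (t + 1)]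
      simp only [Prod.mk.injEq, List.length_cons]
      push_cast
      refine ⟨trivial, trivial, by ring, trivial⟩

-- main invariant: closing A's folded state = componentwise max of the closed initial
-- state with B's grouped run maxima
theorem main_inv : ∀ (cs : List Char), ∀ (l0 l1 tem : Int) (pre : Option Char),
    (∀ c, cs.head? = some c → pre ≠ some c) → 0 ≤ l0 → 0 ≤ l1 → 0 ≤ tem →
    pvClose (cs.foldl pvStepA (l0, l1, tem, pre)) =
      (max (pvClose (l0, l1, tem, pre)).1 (pvM0 cs),
       max (pvClose (l0, l1, tem, pre)).2 (pvM1 cs)) := by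
  intro cs
  induction cs using pvRuns.induct with
  | case1 =>
      intro l0 l1 tem pre _ h0 h1 ht
      have hM0 : pvM0 [] = 0 := by rw [pvM0, pvRuns]; rfl
      have hM1 : pvM1 [] = 0 := by rw [pvM1, pvRuns]; rfl
      simp only [List.foldl_nil, hM0, hM1, pvClose_def]
      by_cases hp : pre = some '1'
      · simp only [hp, ite_true, Prod.mk.injEq]
        exact ⟨(max_eq_left h0).symm,
               (max_eq_left (le_max_of_le_left ht)).symm⟩
      · simp only [hp, ite_false, Prod.mk.injEq]
        exact ⟨(max_eq_left (le_max_of_le_left ht)).symm,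
               (max_eq_left h1).symm⟩
  | case2 c rest ih =>
      intro l0 l1 tem pre hhd h0 h1 ht
      have hpre : pre ≠ some c := hhd c rfl
      have htkall : ∀ x ∈ rest.takeWhile (· == c), x = c := by
        intro x hx
        have := List.mem_takeWhile_imp hx
        simpa using this
      have hhd' : ∀ c', (rest.dropWhile (· == c)).head? = some c' → (some c : Option Char) ≠ some c' := by
        intro c' hc' hEq
        have hcc : c = c' := Option.some.inj hEq
        subst hcc
        have := dropWhile_head_not (· == c) rest c hc'
        simp at this
      set k : Int := 1 + ((rest.takeWhile (· == c)).length : Int) with hk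
      have hlen : (0:Int) ≤ ((rest.takeWhile (· == c)).length : Int) := Int.natCast_nonneg _
      have hkpos : 1 ≤ k := by omega
      -- first step closes the previous run
      have hstep : pvStepA (l0, l1, tem, pre) c =
          ((pvClose (l0, l1, tem, pre)).1, (pvClose (l0, l1, tem, pre)).2, 1, some c) := by
        rw [pvStepA_def, pvClose_def, if_neg (fun h => hpre h.symm)]
        by_cases hp : pre = some '1'
        · simp [hp, max_comm]
        · simp [hp, max_comm]
      set P0 : Int := (pvClose (l0, l1, tem, pre)).1 with hP0
      set P1 : Int := (pvClose (l0, l1, tem, pre)).2 with hP1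
      have hP0n : 0 ≤ P0 := by
        rw [hP0, pvClose_def]
        by_cases hp : pre = some '1'
        · rw [if_pos hp]; exact h0
        · rw [if_neg hp]; exact le_max_of_le_left ht
      have hP1n : 0 ≤ P1 := by
        rw [hP1, pvClose_def]
        by_cases hp : pre = some '1'
        · rw [if_pos hp]; exact le_max_of_le_left ht
        · rw [if_neg hp]; exact h1
      -- fold over the whole c-run
      have hsplit : (c :: rest).foldl pvStepA (l0, l1, tem, pre) =
          (rest.dropWhile (· == c)).foldl pvStepA (P0, P1, k, some c) := by
        conv_lhs => rw [List.foldl_cons, hstep,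
          ← List.takeWhile_append_dropWhile (p := (· == c)) (l := rest), List.foldl_append,
          foldl_run c _ htkall]
      rw [hsplit, ih P0 P1 k (some c) hhd' hP0n hP1n (by omega)]
      -- unfold B's side for the head run
      have hruns : pvRuns (c :: rest) = (c, k) :: pvRuns (rest.dropWhile (· == c)) := by
        rw [pvRuns]
      by_cases hc : c = '1'
      · have hM1 : pvM1 (c :: rest) = max k (pvM1 (rest.dropWhile (· == c))) := by
          unfold pvM1
          rw [hruns, List.filterMap_cons]
          simp only [hc]
          exact foldl_max_cons _ _
        have hM0 : pvM0 (c :: rest) = pvM0 (rest.dropWhile (· == c)) := by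
          unfold pvM0
          rw [hruns, List.filterMap_cons]
          simp [hc]
        have hcl : pvClose (P0, P1, k, some c) = (P0, max k P1) := by
          rw [pvClose_def]; simp [hc]
        rw [hcl, hM0, hM1]
        simp only [Prod.mk.injEq]
        exact ⟨trivial, by rw [max_assoc]; exact max_left_comm _ _ _⟩
      · have hM0 : pvM0 (c :: rest) = max k (pvM0 (rest.dropWhile (· == c))) := by
          unfold pvM0
          rw [hruns, List.filterMap_cons]
          simp only [ne_eq, hc, not_false_iff, if_pos]
          exact foldl_max_cons _ _
        have hM1 : pvM1 (c :: rest) = pvM1 (rest.dropWhile (· == c)) := by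
          unfold pvM1
          rw [hruns, List.filterMap_cons]
          simp [hc]
        have hcl : pvClose (P0, P1, k, some c) = (max k P0, P1) := by
          rw [pvClose_def, if_neg (by simpa using hc)]
        rw [hcl, hM0, hM1]
        simp only [Prod.mk.injEq]
        exact ⟨by rw [max_assoc]; exact max_left_comm _ _ _, trivial⟩

-- elements of B's filtered run-length lists are run lengths, hence ≥ 1 ≥ 0
theorem filterMap_runs_nonneg (cs : List Char) (f : Char × Int → Option Int)
    (hf : ∀ p x, f p = some x → x = p.2) :
    ∀ x ∈ (pvRuns cs).filterMap f, 0 ≤ x := by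
  intro x hx
  rcases List.mem_filterMap.mp hx with ⟨p, hp, hfp⟩
  have := pvRuns_len_pos cs p hp
  have := hf p x hfp
  omega

theorem first_run_le (cs : List Char) (c : Char) (k : Int) (f : Char × Int → Option Int)
    (hhd : (pvRuns cs).head? = some (c, k)) (hf : f (c, k) = some k) :
    k ≤ ((pvRuns cs).filterMap f).foldl max 0 := by
  have hmem : (c, k) ∈ pvRuns cs := by
    cases h : pvRuns cs with
    | nil => simp [h] at hhd
    | cons p t =>
        rcases p with ⟨pc, pk⟩
        rw [h] at hhd
        simp only [List.head?_cons, Option.some.injEq, Prod.mk.injEq] at hhd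
        obtain ⟨h1, h2⟩ := hhd
        subst h1; subst h2
        exact List.mem_cons_self
  have hmem2 : k ∈ (pvRuns cs).filterMap f := List.mem_filterMap.mpr ⟨(c, k), hmem, hf⟩
  exact (PySem.List.le_foldl_max _ 0).2 k hmem2

-- ===== VERDICT (by name: the statement is the Claim_ definition above) =====
theorem checkZeroOnes_spec : Claim_equal_checkZeroOnes := by
  intro s _ hpre
  unfold Spec_checkZeroOnes checkZeroOnes checkZeroOnes_alt
  have hcs : s.toList ≠ [] := by
    intro h
    exact hpre (String.toList_eq_nil_iff.mp h)
  cases hcsE : s.toList with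
  | nil => exact absurd hcsE hcs
  | cons c0 t =>
    simp only [List.head?_cons]
    -- B's side in foldl-max normal form
    rw [maxD_eq_foldl _ (filterMap_runs_nonneg _ _ (by intro p x h; split at h <;> simp_all)),
        maxD_eq_foldl _ (filterMap_runs_nonneg _ _ (by intro p x h; split at h <;> simp_all))]
    have hmain := main_inv (c0 :: t) (if c0 = '0' then 1 else 0) (if c0 = '1' then 1 else 0) 0 none
      (by intro c _ hn; simp at hn) (by split <;> omega) (by split <;> omega) le_rfl
    rcases hF : (c0 :: t).foldl pvStepA (if c0 = '0' then (1:Int) else 0, if c0 = '1' then (1:Int) else 0, 0, none) with ⟨l0, l1, tem, pre⟩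
    rw [hF] at hmain
    -- initial closed state
    have hinit : pvClose (if c0 = '0' then (1:Int) else 0, if c0 = '1' then (1:Int) else 0, 0, none) =
        (if c0 = '0' then 1 else 0, if c0 = '1' then 1 else 0) := by
      rw [pvClose_def, if_neg (by simp)]
      simp only [Prod.mk.injEq]
      exact ⟨by split <;> decide, trivial⟩
    rw [hinit] at hmain
    -- facts about the run maxima
    have hM0n : 0 ≤ pvM0 (c0 :: t) := foldl_max_nonneg _
    have hM1n : 0 ≤ pvM1 (c0 :: t) := foldl_max_nonneg _
    have hhd : (pvRuns (c0 :: t)).head? = some (c0, 1 + ((t.takeWhile (· == c0)).length : Int)) := by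
      rw [pvRuns]
      rfl
    have hP0le : (if c0 = '0' then (1:Int) else 0) ≤ pvM0 (c0 :: t) := by
      by_cases h0 : c0 = '0'
      · have : (1 : Int) + ((t.takeWhile (· == c0)).length : Int) ≤ pvM0 (c0 :: t) :=
          first_run_le (c0 :: t) c0 _ _ hhd (by simp [h0])
        rw [if_pos h0]
        have hlen : (0:Int) ≤ ((t.takeWhile (· == c0)).length : Int) := Int.natCast_nonneg _
        omega
      · simpa [h0] using hM0n
    have hP1le : (if c0 = '1' then (1:Int) else 0) ≤ pvM1 (c0 :: t) := by
      by_cases h1 : c0 = '1'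
      · have : (1 : Int) + ((t.takeWhile (· == c0)).length : Int) ≤ pvM1 (c0 :: t) :=
          first_run_le (c0 :: t) c0 _ _ hhd (by simp [h1])
        rw [if_pos h1]
        have hlen : (0:Int) ≤ ((t.takeWhile (· == c0)).length : Int) := Int.natCast_nonneg _
        omega
      · simpa [h1] using hM1n
    -- A's result equals decide (close.1 < close.2)
    have hA : (if pre = some '1' then decide (l0 < max tem l1) else decide (max tem l0 < l1)) =
        decide ((pvClose (l0, l1, tem, pre)).1 < (pvClose (l0, l1, tem, pre)).2) := by
      rw [pvClose_def]
      by_cases hp : pre = some '1' <;> simp [hp]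
    rw [hA, hmain]
    have hfst : max ((if c0 = '0' then (1:Int) else 0, if c0 = '1' then (1:Int) else 0)).1 (pvM0 (c0 :: t)) = pvM0 (c0 :: t) := max_eq_right hP0le
    have hsnd : max ((if c0 = '0' then (1:Int) else 0, if c0 = '1' then (1:Int) else 0)).2 (pvM1 (c0 :: t)) = pvM1 (c0 :: t) := max_eq_right hP1le
    rw [hfst, hsnd]
    rfl

@[simp] theorem checkZeroOnes_raises : Claim_raises_checkZeroOnes := by
  unfold Claim_raises_checkZeroOnes
  refine ⟨fun s _ hr hp => hp hr, by decide, rfl, ?_⟩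
  show checkZeroOnes_alt "" = false
  unfold checkZeroOnes_alt
  rw [show ("" : String).toList = [] from by decide, pvRuns]
  rfl
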